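-- pv_equiv track=rewrite | github.com/aymank2020/OCR_Atlas_annotation_final_project | src/solver/chat_only.py | _strip_structural_operations_contract
-- ===== SOURCE A (Python) =====
-- from typing import Any, Callable, Dict, List, Optional
--
-- _LABELS_PROMPT_STRIP_PREFIXES = (
--     "If boundaries are fundamentally wrong,",
--     "Allowed operations:",
--     "Operation segment_index refers",
--     "Operations must be ordered exactly",
--     "Return strict JSON object only:",
--     "Response must start with '{' and end with '}'.",
--     "Do not wrap JSON in markdown code fences.",
--     'If no structural change is needed, return "operations":[]',
--     "Structural operations are disabled for this pass.",
--     "Return operations as an empty list.",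
-- )
--
-- def _strip_structural_operations_contract(prompt_text: str) -> str:
--     cleaned_lines: List[str] = []
--     for raw_line in str(prompt_text or "").splitlines():
--         line = str(raw_line or "")
--         stripped = line.strip()
--         if not stripped:
--             cleaned_lines.append("")
--             continue
--         if any(stripped.startswith(prefix) for prefix in _LABELS_PROMPT_STRIP_PREFIXES):
--             continue
--         if '"operations":' in stripped or '{"operations":' in stripped:
--             continue
--         cleaned_lines.append(line)
--     collapsed: List[str] = []
--     previous_blank = False
--     for line in cleaned_lines:
--         is_blank = not str(line or "").strip()
--         if is_blank and previous_blank: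
--             continue
--         collapsed.append(line)
--         previous_blank = is_blank
--     return "\n".join(collapsed).strip()
-- ===== SOURCE B (Python) =====
-- from typing import List
--
-- _LABELS_PROMPT_STRIP_PREFIXES = (
--     "If boundaries are fundamentally wrong,",
--     "Allowed operations:",
--     "Operation segment_index refers",
--     "Operations must be ordered exactly",
--     "Return strict JSON object only:",
--     "Response must start with '{' and end with '}'.",
--     "Do not wrap JSON in markdown code fences.",
--     'If no structural change is needed, return "operations":[]',
--     "Structural operations are disabled for this pass.",
--     "Return operations as an empty list.",
-- )
--
-- def _strip_structural_operations_contract(prompt_text: str) -> str: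
--     # single pass: fuse the filtering and the blank-collapsing loops
--     result: List[str] = []
--     previous_blank = False
--     for line in str(prompt_text or "").splitlines():
--         stripped = line.strip()
--         if not stripped:
--             if not previous_blank:
--                 result.append("")
--                 previous_blank = True
--             continue
--         if any(stripped.startswith(p) for p in _LABELS_PROMPT_STRIP_PREFIXES) or '"operations":' in stripped:
--             continue
--         result.append(line)
--         previous_blank = False
--     return "\n".join(result).strip()
-- ===== Notes on version B (the rewrite author's own statement) =====
-- stated objective: simpler
-- what changed: B fuses A's two sequential loops (filter into cleaned_lines, then collapse consecutive blanks) into one pass driven by a previous_blank flag, dropping the intermediate list and merging A's two operations-marker containment checks (the second is subsumed by the first) into one.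
import Mathlib
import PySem

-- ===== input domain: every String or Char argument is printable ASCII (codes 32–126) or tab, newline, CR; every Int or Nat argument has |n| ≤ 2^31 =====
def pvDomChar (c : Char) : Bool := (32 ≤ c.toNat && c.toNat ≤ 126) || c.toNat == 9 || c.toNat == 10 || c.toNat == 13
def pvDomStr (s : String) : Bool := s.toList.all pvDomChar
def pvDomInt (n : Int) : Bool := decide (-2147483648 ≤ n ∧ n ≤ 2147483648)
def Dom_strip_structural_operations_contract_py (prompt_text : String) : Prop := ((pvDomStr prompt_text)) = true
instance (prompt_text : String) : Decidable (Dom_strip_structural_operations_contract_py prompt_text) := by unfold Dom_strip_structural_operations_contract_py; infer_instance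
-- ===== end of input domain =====

-- B fuses A's two loops (filter, then blank-collapse) into one pass with a previous_blank flag; objective: simpler.

-- ===== PORT A =====
def pvPrefixes : List String :=
  ["If boundaries are fundamentally wrong,",
   "Allowed operations:",
   "Operation segment_index refers",
   "Operations must be ordered exactly",
   "Return strict JSON object only:",
   "Response must start with '{' and end with '}'.",
   "Do not wrap JSON in markdown code fences.",
   "If no structural change is needed, return \"operations\":[]",
   "Structural operations are disabled for this pass.",
   "Return operations as an empty list."]

-- first loop of A: build cleaned_lines
def pvCleanA : List String → List String
  | [] => []
  | line :: rest =>
    let stripped := PySem.Str.strip line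
    if stripped == "" then "" :: pvCleanA rest
    else if pvPrefixes.any (fun p => PySem.Str.startswith stripped p) then pvCleanA rest
    else if PySem.Str.isIn "\"operations\":" stripped || PySem.Str.isIn "{\"operations\":" stripped then pvCleanA rest
    else line :: pvCleanA rest

-- second loop of A: collapse consecutive blanks, state previous_blank
def pvCollapseA : List String → Bool → List String
  | [], _ => []
  | line :: rest, prevBlank =>
    let isBlank := PySem.Str.strip line == ""
    if isBlank && prevBlank then pvCollapseA rest prevBlank
    else line :: pvCollapseA rest isBlank

def strip_structural_operations_contract_py (prompt_text : String) : String :=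
  PySem.Str.strip (PySem.Str.join "\n" (pvCollapseA (pvCleanA (PySem.Str.splitlines prompt_text)) false))

-- ===== PORT B =====
-- B's single fused loop, state previous_blank
def pvFusedB : List String → Bool → List String
  | [], _ => []
  | line :: rest, prevBlank =>
    let stripped := PySem.Str.strip line
    if stripped == "" then
      if prevBlank then pvFusedB rest prevBlank
      else "" :: pvFusedB rest true
    else if pvPrefixes.any (fun p => PySem.Str.startswith stripped p)
            || PySem.Str.isIn "\"operations\":" stripped then pvFusedB rest prevBlank
    else line :: pvFusedB rest false

def strip_structural_operations_contract_py_alt (prompt_text : String) : String :=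
  PySem.Str.strip (PySem.Str.join "\n" (pvFusedB (PySem.Str.splitlines prompt_text) false))

-- ===== PRECONDITION & SPEC =====
def Spec_strip_structural_operations_contract_py (prompt_text : String) (out : String) : Prop := out = strip_structural_operations_contract_py_alt prompt_text
instance (prompt_text : String) (out : String) : Decidable (Spec_strip_structural_operations_contract_py prompt_text out) := by unfold Spec_strip_structural_operations_contract_py; infer_instance

-- ===== CLAIM (what is proved, stated in full; the proofs are below) =====
def Claim_equal_strip_structural_operations_contract_py : Prop := ∀ (prompt_text : String), Dom_strip_structural_operations_contract_py prompt_text → Spec_strip_structural_operations_contract_py prompt_text (strip_structural_operations_contract_py prompt_text)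

-- ===== LEMMAS AND PROOFS =====
lemma pvFuse_eq (lines : List String) : ∀ pb : Bool,
    pvCollapseA (pvCleanA lines) pb = pvFusedB lines pb := by
  induction lines with
  | nil => intro pb; rfl
  | cons line rest ih =>
    intro pb
    simp only [pvCleanA, pvFusedB]
    by_cases h1 : (PySem.Str.strip line == "") = true
    · rw [if_pos h1, if_pos h1]
      simp only [pvCollapseA]
      have hb : (PySem.Str.strip "" == "") = true := by decide
      rw [hb]
      cases pb <;> simp [ih]
    · rw [if_neg h1, if_neg h1]
      by_cases h2 : (pvPrefixes.any fun p => PySem.Str.startswith (PySem.Str.strip line) p) = true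
      · rw [if_pos h2, if_pos (Bool.or_eq_true_iff.mpr (Or.inl h2)), ih]
      · rw [if_neg h2]
        have h2f : (pvPrefixes.any fun p => PySem.Str.startswith (PySem.Str.strip line) p) = false :=
          Bool.eq_false_iff.mpr h2
        by_cases h3 : (PySem.Str.isIn "\"operations\":" (PySem.Str.strip line)
            || PySem.Str.isIn "{\"operations\":" (PySem.Str.strip line)) = true
        · -- a line containing '{"operations":' also contains '"operations":'
          have hq : PySem.Str.isIn "\"operations\":" (PySem.Str.strip line) = true := by
            rcases Bool.or_eq_true_iff.mp h3 with h | h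
            · exact h
            · rw [PySem.Str.isIn_iff_infix] at h ⊢
              exact List.IsInfix.trans (by decide) h
          rw [if_pos h3, if_pos (Bool.or_eq_true_iff.mpr (Or.inr hq)), ih]
        · rw [if_neg h3]
          have h3f : (PySem.Str.isIn "\"operations\":" (PySem.Str.strip line)
              || PySem.Str.isIn "{\"operations\":" (PySem.Str.strip line)) = false :=
            Bool.eq_false_iff.mpr h3
          have hBcond : (( pvPrefixes.any fun p => PySem.Str.startswith (PySem.Str.strip line) p)
              || PySem.Str.isIn "\"operations\":" (PySem.Str.strip line)) = false := by
            rw [h2f, Bool.false_or]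
            exact (Bool.or_eq_false_iff.mp h3f).1
          rw [hBcond]
          simp only [pvCollapseA]
          have h1f : (PySem.Str.strip line == "") = false := Bool.eq_false_iff.mpr h1
          rw [h1f]
          simp [ih]

-- ===== VERDICT (by name: the statement is the Claim_ definition above) =====
theorem strip_structural_operations_contract_py_spec : Claim_equal_strip_structural_operations_contract_py := by
  intro p _
  unfold Spec_strip_structural_operations_contract_py strip_structural_operations_contract_py strip_structural_operations_contract_py_alt
  rw [pvFuse_eq]
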